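-- pv_equiv track=rewrite | github.com/1Ash0/ML-Air-Pollutants | 1_ingest_excel.py | _make_unique_names
-- ===== SOURCE A (Python) =====
-- def _make_unique_names(names: list[str]) -> list[str]:
--     seen: dict[str, int] = {}
--     out: list[str] = []
--     for n in names:
--         key = n
--         if key in seen:
--             seen[key] += 1
--             key = f"{n}__{seen[n]}"
--         else:
--             seen[key] = 1
--         out.append(key)
--     return out
-- ===== SOURCE B (Python) =====
-- def _make_unique_names(names: list[str]) -> list[str]:
--     # Two staged passes: group the positions of each name, then write each
--     # occurrence's disambiguated form back into a preallocated output list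
--     # by its original index (rank 0 -> bare name, rank r -> name__{r+1}).
--     groups: dict[str, list[int]] = {}
--     for i, n in enumerate(names):
--         groups.setdefault(n, []).append(i)
--     out = [""] * len(names)
--     for n, idxs in groups.items():
--         for r, i in enumerate(idxs):
--             out[i] = n if r == 0 else f"{n}__{r + 1}"
--     return out
-- ===== Notes on version B (the rewrite author's own statement) =====
-- stated objective: alternative
-- what changed: Replaces A's single pass with a running seen-counter dict by two staged passes: first group all positions of each name into an index dict, then write each occurrence's disambiguated form (rank 0 bare, rank r -> name__{r+1}) into a preallocated output list by its stored original index.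
import Mathlib
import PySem

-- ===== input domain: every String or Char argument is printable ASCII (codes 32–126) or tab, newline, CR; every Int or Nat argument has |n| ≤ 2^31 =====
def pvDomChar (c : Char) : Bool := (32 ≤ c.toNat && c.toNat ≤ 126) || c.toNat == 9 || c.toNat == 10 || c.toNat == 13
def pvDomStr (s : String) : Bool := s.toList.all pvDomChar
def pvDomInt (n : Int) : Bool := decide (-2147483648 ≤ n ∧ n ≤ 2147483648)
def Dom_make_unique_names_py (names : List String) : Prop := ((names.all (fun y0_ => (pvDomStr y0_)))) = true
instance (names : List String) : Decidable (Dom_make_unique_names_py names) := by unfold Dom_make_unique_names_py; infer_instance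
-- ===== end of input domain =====

-- B replaces A's one-pass seen-counter loop by two staged passes: group the positions of each
-- name into an index dict, then write each occurrence's disambiguated form back into a
-- preallocated output by original index (alternative decomposition, not claimed faster).

-- ===== PORT A =====
-- one loop iteration of A: (seen dict, out list) state
def pvStepA (st : PySem.Dict String Int × List String) (n : String) :
    PySem.Dict String Int × List String :=
  if st.1.contains n then                                             -- if key in seen:
    let seen' := st.1.insert n (st.1.getD n 0 + 1)                    --   seen[key] += 1
    (seen', st.2 ++ [n ++ "__" ++ PySem.Int.toStr (seen'.getD n 0)])  --   key = f"{n}__{seen[n]}"; out.append(key)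
  else
    (st.1.insert n 1, st.2 ++ [n])                                    -- else: seen[key] = 1; out.append(key)

def make_unique_names_py (names : List String) : List String :=
  (names.foldl pvStepA (PySem.Dict.empty, [])).2

-- ===== PORT B =====
-- first pass of B: groups.setdefault(n, []).append(i) over enumerate(names)
def pvGroupsB (names : List String) : PySem.Dict String (List Int) :=
  (PySem.List.enumerate names).foldl
    (fun d p => d.modify p.2 [] (fun l => l ++ [p.1])) PySem.Dict.empty

def make_unique_names_py_alt (names : List String) : List String :=
  let out0 : List String := List.replicate names.length ""            -- out = [""] * len(names)
  (pvGroupsB names).items.foldl                                       -- for n, idxs in groups.items():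
    (fun out q =>
      (PySem.List.enumerate q.2).foldl                                --   for r, i in enumerate(idxs):
        (fun out r =>
          PySem.List.pySetD out r.2                                   --     out[i] = …  (i ≥ 0 always: exact)
            (if r.1 = 0 then q.1 else q.1 ++ "__" ++ PySem.Int.toStr (r.1 + 1)))
        out)
    out0

-- ===== PRECONDITION & SPEC =====
def Spec_make_unique_names_py (names : List String) (out : List String) : Prop := out = make_unique_names_py_alt names
instance (names : List String) (out : List String) : Decidable (Spec_make_unique_names_py names out) := by unfold Spec_make_unique_names_py; infer_instance

-- ===== CLAIM (what is proved, stated in full; the proofs are below) =====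
def Claim_equal_make_unique_names_py : Prop := ∀ (names : List String), Dom_make_unique_names_py names → Spec_make_unique_names_py names (make_unique_names_py names)

-- ===== LEMMAS AND PROOFS =====

-- the disambiguated form of the occurrence of n whose prefix already holds c copies of n
def pvF (n : String) (c : Nat) : String :=
  if c = 0 then n else n ++ "__" ++ PySem.Int.toStr ((c : Int) + 1)

-- the positions (as Python ints) at which n occurs in xs, in order
def pvIdxs (n : String) (xs : List String) : List Int :=
  ((PySem.List.enumerate xs).filter (fun p => p.2 == n)).map (fun p => p.1)

-- the common characterisation both programs are reduced to
def pvTarget (xs : List String) : List String :=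
  (List.range xs.length).map (fun j => pvF (xs.getD j "") ((xs.take j).count (xs.getD j "")))

-- B's write list, flattened: (index, value) pairs in the order B performs them
def pvWs (xs : List String) : List (Int × String) :=
  (pvGroupsB xs).items.flatMap (fun q =>
    (PySem.List.enumerate q.2).map (fun r =>
      (r.2, if r.1 = 0 then q.1 else q.1 ++ "__" ++ PySem.Int.toStr (r.1 + 1))))

theorem pvVal_cast (n : String) (c : Nat) :
    (if (c : Int) = 0 then n else n ++ "__" ++ PySem.Int.toStr ((c : Int) + 1)) = pvF n c := by
  by_cases h : c = 0 <;> simp [pvF, h, Int.natCast_eq_zero]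

-- ---- A-side ----

-- invariant of A's loop: the seen dict records the occurrence count of each name in the processed prefix
theorem pvFoldA_dict (xs : List String) (n : String) :
    ((xs.foldl pvStepA (PySem.Dict.empty, [])).1.getD n 0 = (xs.count n : Int)) ∧
    ((xs.foldl pvStepA (PySem.Dict.empty, [])).1.contains n = decide (n ∈ xs)) := by
  induction xs using List.reverseRecOn generalizing n with
  | nil => simp [PySem.Dict.getD_empty, PySem.Dict.contains_empty]
  | append_singleton ys y ih =>
    rw [List.foldl_append]
    obtain ⟨hgn, hcn⟩ := ih n
    obtain ⟨hgy, hcy⟩ := ih y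
    simp only [List.foldl_cons, List.foldl_nil, pvStepA]
    have hcnt : (ys ++ [y]).count n = ys.count n + if n = y then 1 else 0 := by
      by_cases hn : n = y
      · simp [List.count_append, hn]
      · simp [List.count_append, hn, Ne.symm hn]
    by_cases hy : y ∈ ys
    · simp only [hcy, hy, decide_true, if_true]
      refine ⟨?_, ?_⟩
      · rw [PySem.Dict.getD_insert, hcnt]
        by_cases hn : n = y
        · subst hn; simp [hgy]
        · simp [hn, hgn]
      · rw [PySem.Dict.contains_insert]
        by_cases hn : n = y
        · subst hn; simp [hy]
        · simp [hn, hcn]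
    · simp only [hcy, hy, decide_false, Bool.false_eq_true, if_false]
      refine ⟨?_, ?_⟩
      · rw [PySem.Dict.getD_insert, hcnt]
        by_cases hn : n = y
        · subst hn
          simp [List.count_eq_zero.mpr hy]
        · simp [hn, hgn]
      · rw [PySem.Dict.contains_insert]
        by_cases hn : n = y
        · subst hn; simp
        · simp [hn, hcn]

theorem pvFoldA_snoc (xs : List String) (x : String) :
    make_unique_names_py (xs ++ [x]) =
      make_unique_names_py xs ++ [pvF x (xs.count x)] := by
  unfold make_unique_names_py pvF
  rw [List.foldl_append]
  obtain ⟨hg, hc⟩ := pvFoldA_dict xs x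
  simp only [List.foldl_cons, List.foldl_nil, pvStepA]
  by_cases hx : x ∈ xs
  · have h0 : ¬ xs.count x = 0 := by simp [List.count_eq_zero, hx]
    simp [hc, hx, h0, PySem.Dict.getD_insert_self, hg]
  · have h0 : xs.count x = 0 := List.count_eq_zero.mpr hx
    simp [hc, hx, h0]

theorem pvTarget_snoc (xs : List String) (x : String) :
    pvTarget (xs ++ [x]) = pvTarget xs ++ [pvF x (xs.count x)] := by
  unfold pvTarget
  simp only [List.length_append, List.length_singleton]
  rw [show xs.length + 1 = (xs.length).succ from rfl, List.range_succ, List.map_append]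
  congr 1
  · apply List.map_congr_left
    intro j hj
    have hj' : j < xs.length := List.mem_range.mp hj
    rw [List.take_append_of_le_length (le_of_lt hj')]
    congr 1 <;> simp [List.getD, List.getElem?_append_left hj']
  · simp [List.getD, List.take_append_of_le_length (le_refl xs.length)]

theorem pvA_eq_target (xs : List String) : make_unique_names_py xs = pvTarget xs := by
  induction xs using List.reverseRecOn with
  | nil => rfl
  | append_singleton ys y ih => rw [pvFoldA_snoc, pvTarget_snoc, ih]

-- ---- B-side: the grouping dict ----

theorem pvGroupsB_getD (xs : List String) (n : String) :
    (pvGroupsB xs).getD n [] = pvIdxs n xs := by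
  unfold pvGroupsB pvIdxs
  rw [show (PySem.List.enumerate xs).foldl
        (fun d p => d.modify p.2 [] (fun l => l ++ [p.1])) PySem.Dict.empty
      = ((PySem.List.enumerate xs).map Prod.swap).foldl
        (fun d q => d.modify q.1 [] (fun l => l ++ [q.2])) PySem.Dict.empty
      by rw [List.foldl_map]; rfl]
  rw [PySem.Dict.getD_foldl_modify_append]
  simp [List.filter_map, Function.comp_def]

theorem pvGroupsB_nodup_keys (xs : List String) : (pvGroupsB xs).keys.Nodup := by
  unfold pvGroupsB
  exact PySem.Dict.nodup_keys_foldl_modify_key (PySem.List.enumerate xs)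
    (fun p => p.2) [] (fun _ p l => l ++ [p.1]) PySem.Dict.empty (by simp)

theorem pvGroupsB_mem_keys (xs : List String) (n : String) :
    n ∈ (pvGroupsB xs).keys ↔ n ∈ xs := by
  unfold pvGroupsB
  rw [PySem.Dict.keys_foldl_modify_key (PySem.List.enumerate xs)
    (fun p => p.2) [] (fun _ p l => l ++ [p.1]) PySem.Dict.empty]
  simp [PySem.List.map_snd_enumerate]

theorem pvGroupsB_mem_items (xs : List String) (n : String) (hn : n ∈ xs) :
    (n, pvIdxs n xs) ∈ (pvGroupsB xs).items := by
  have hc : (pvGroupsB xs).contains n = true :=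
    (PySem.Dict.contains_iff_mem_keys _ _).mpr ((pvGroupsB_mem_keys xs n).mpr hn)
  have hs : ((pvGroupsB xs).get? n).isSome := by
    rw [← PySem.Dict.contains_eq_isSome_get?]; exact hc
  obtain ⟨v, hv⟩ := Option.isSome_iff_exists.mp hs
  have : (pvGroupsB xs).getD n [] = v := PySem.Dict.getD_of_get?_eq_some _ _ hv
  rw [← pvGroupsB_getD xs n, this]
  exact PySem.Dict.mem_items_of_get?_eq_some _ hv

theorem pvGroupsB_items_val (xs : List String) (k : String) (l : List Int)
    (h : (k, l) ∈ (pvGroupsB xs).items) : l = pvIdxs k xs := by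
  have := PySem.Dict.get?_of_mem_items _ h (pvGroupsB_nodup_keys xs)
  rw [← pvGroupsB_getD xs k]
  exact (PySem.Dict.getD_of_get?_eq_some _ _ this).symm

-- ---- B-side: structure of pvIdxs ----

theorem pvIdxs_snoc (n : String) (xs : List String) (x : String) :
    pvIdxs n (xs ++ [x]) = pvIdxs n xs ++ (if x = n then [(xs.length : Int)] else []) := by
  unfold pvIdxs
  rw [PySem.List.enumerate_append, List.filter_append, List.map_append]
  congr 1
  simp [PySem.List.enumerate_cons, PySem.List.enumerate_nil]
  by_cases hx : x = n <;> simp [hx]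

theorem pvIdxs_length (n : String) (xs : List String) :
    (pvIdxs n xs).length = xs.count n := by
  induction xs using List.reverseRecOn with
  | nil => simp [pvIdxs, PySem.List.enumerate_nil]
  | append_singleton ys y ih =>
    rw [pvIdxs_snoc]
    by_cases hy : y = n <;>
      simp [hy, List.count_append, ih]

-- forward: occurrence j of name xs[j] appears at rank (prefix count) in its group
theorem pvIdxs_rank_mem (xs : List String) (j : Nat) (hj : j < xs.length) :
    ((((xs.take j).count (xs.getD j "") : Int)), (j : Int)) ∈
      PySem.List.enumerate (pvIdxs (xs.getD j "") xs) := by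
  induction xs using List.reverseRecOn with
  | nil => simp at hj
  | append_singleton ys y ih =>
    rcases Nat.lt_succ_iff_lt_or_eq.mp (by simpa using hj) with hlt | heq
    · have hget : (ys ++ [y]).getD j "" = ys.getD j "" := by
        simp [List.getD, List.getElem?_append_left hlt]
      rw [hget, List.take_append_of_le_length (le_of_lt hlt), pvIdxs_snoc,
        PySem.List.enumerate_append]
      exact List.mem_append_left _ (ih hlt)
    · subst heq
      have hget : (ys ++ [y]).getD ys.length "" = y := by simp [List.getD]
      rw [hget, List.take_append_of_le_length (le_refl ys.length), List.take_length,
        pvIdxs_snoc, PySem.List.enumerate_append]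
      refine List.mem_append_right _ ?_
      simp [PySem.List.enumerate_cons, pvIdxs_length]

-- backward: every enumerated element of a group is such an occurrence
theorem pvIdxs_rank_inv (xs : List String) (n : String) (r m : Int)
    (h : (r, m) ∈ PySem.List.enumerate (pvIdxs n xs)) :
    0 ≤ m ∧ m < (xs.length : Int) ∧ xs.getD m.toNat "" = n ∧
      r = ((xs.take m.toNat).count n : Int) := by
  induction xs using List.reverseRecOn with
  | nil => simp [pvIdxs, PySem.List.enumerate_nil] at h
  | append_singleton ys y ih =>
    rw [pvIdxs_snoc, PySem.List.enumerate_append] at h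
    rcases List.mem_append.mp h with h | h
    · obtain ⟨h0, h1, h2, h3⟩ := ih h
      have hlt : m.toNat < ys.length := by omega
      refine ⟨h0, by simp; omega, ?_, ?_⟩
      · simp only [List.getD] at h2 ⊢
        rw [List.getElem?_append_left hlt]; exact h2
      · rw [List.take_append_of_le_length (le_of_lt hlt)]; exact h3
    · by_cases hy : y = n
      · simp [hy, PySem.List.enumerate_cons, pvIdxs_length] at h
        obtain ⟨hr, hm⟩ := h
        subst hm
        have ht : ((ys.length : Int)).toNat = ys.length := by omega
        refine ⟨by omega, by simp, ?_, ?_⟩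
        · rw [ht]; simp [List.getD, hy]
        · rw [ht, List.take_append_of_le_length (le_refl ys.length), List.take_length, hr]
      · simp [hy] at h

-- ---- B-side: the write loop ----

theorem pvAlt_eq_foldWs (xs : List String) :
    make_unique_names_py_alt xs =
      (pvWs xs).foldl (fun o p => PySem.List.pySetD o p.1 p.2) (List.replicate xs.length "") := by
  unfold make_unique_names_py_alt pvWs
  rw [List.foldl_flatMap]
  have hf : (fun (out : List String) (q : String × List Int) =>
        (PySem.List.enumerate q.2).foldl
          (fun out r => PySem.List.pySetD out r.2
            (if r.1 = 0 then q.1 else q.1 ++ "__" ++ PySem.Int.toStr (r.1 + 1))) out)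
      = (fun (acc : List String) (x : String × List Int) =>
        ((PySem.List.enumerate x.2).map (fun r =>
            (r.2, if r.1 = 0 then x.1 else x.1 ++ "__" ++ PySem.Int.toStr (r.1 + 1)))).foldl
          (fun o p => PySem.List.pySetD o p.1 p.2) acc) := by
    funext out q
    rw [List.foldl_map]
  exact congrArg (fun f => (pvGroupsB xs).items.foldl f (List.replicate xs.length "")) hf

theorem pvFoldSet_length (ws : List (Int × String)) (out : List String) :
    (ws.foldl (fun o p => PySem.List.pySetD o p.1 p.2) out).length = out.length := by
  induction ws generalizing out with
  | nil => rfl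
  | cons p tl ih => simp [List.foldl_cons, ih, PySem.List.length_pySetD]

theorem pvFoldSet_get? (ws : List (Int × String)) (out : List String) (j : Nat) (v : String)
    (hpos : ∀ p ∈ ws, 0 ≤ p.1)
    (huni : ∀ p ∈ ws, p.1 = (j : Int) → p.2 = v)
    (hj : j < out.length)
    (H : out[j]? = some v ∨ ((j : Int), v) ∈ ws) :
    (ws.foldl (fun o p => PySem.List.pySetD o p.1 p.2) out)[j]? = some v := by
  induction ws generalizing out with
  | nil =>
    rcases H with H | H
    · exact H
    · simp at H
  | cons p tl ih =>
    simp only [List.foldl_cons]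
    have hp0 : 0 ≤ p.1 := hpos p (List.mem_cons_self ..)
    rw [PySem.List.pySetD_of_nonneg _ _ hp0]
    by_cases hpj : p.1 = (j : Int)
    · have hv : p.2 = v := huni p (List.mem_cons_self ..) hpj
      have htn : p.1.toNat = j := by omega
      refine ih _ (fun q hq => hpos q (List.mem_cons_of_mem _ hq))
        (fun q hq => huni q (List.mem_cons_of_mem _ hq))
        (by simpa using hj) (Or.inl ?_)
      rw [htn, hv]
      exact List.getElem?_set_self hj
    · have htn : p.1.toNat ≠ j := by omega
      refine ih _ (fun q hq => hpos q (List.mem_cons_of_mem _ hq))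
        (fun q hq => huni q (List.mem_cons_of_mem _ hq))
        (by simpa using hj) ?_
      rcases H with H | H
      · exact Or.inl (by rw [List.getElem?_set_ne htn]; exact H)
      · rcases List.mem_cons.mp H with He | H
        · exact absurd (by rw [← He]) hpj
        · exact Or.inr H

-- every write in B's write list is an occurrence write: index m in range and value pvF at m
theorem pvWs_spec (xs : List String) (p : Int × String) (hp : p ∈ pvWs xs) :
    0 ≤ p.1 ∧ p.1 < (xs.length : Int) ∧
      p.2 = pvF (xs.getD p.1.toNat "") ((xs.take p.1.toNat).count (xs.getD p.1.toNat "")) := by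
  obtain ⟨q, hq, hpq⟩ := List.mem_flatMap.mp hp
  obtain ⟨r, hr, hrp⟩ := List.mem_map.mp hpq
  have hval : q.2 = pvIdxs q.1 xs := pvGroupsB_items_val xs q.1 q.2 (by simpa using hq)
  rw [hval] at hr
  obtain ⟨h0, h1, h2, h3⟩ := pvIdxs_rank_inv xs q.1 r.1 r.2 (by simpa using hr)
  subst hrp
  refine ⟨h0, h1, ?_⟩
  simp only
  rw [h3, h2, pvVal_cast]

theorem pvWs_mem (xs : List String) (j : Nat) (hj : j < xs.length) :
    ((j : Int), pvF (xs.getD j "") ((xs.take j).count (xs.getD j ""))) ∈ pvWs xs := by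
  have hmem : xs.getD j "" ∈ xs := by
    rw [List.getD_eq_getElem xs "" hj]
    exact List.getElem_mem hj
  refine List.mem_flatMap.mpr ⟨(xs.getD j "", pvIdxs (xs.getD j "") xs),
    pvGroupsB_mem_items xs _ hmem, ?_⟩
  refine List.mem_map.mpr ⟨((((xs.take j).count (xs.getD j "") : Int)), (j : Int)),
    pvIdxs_rank_mem xs j hj, ?_⟩
  simp only
  rw [pvVal_cast]

theorem pvAlt_getElem? (xs : List String) (j : Nat) (hj : j < xs.length) :
    (make_unique_names_py_alt xs)[j]? =
      some (pvF (xs.getD j "") ((xs.take j).count (xs.getD j ""))) := by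
  rw [pvAlt_eq_foldWs]
  refine pvFoldSet_get? (pvWs xs) _ j _ (fun p hp => (pvWs_spec xs p hp).1)
    (fun p hp hpj => ?_) (by simpa using hj) (Or.inr (pvWs_mem xs j hj))
  obtain ⟨-, -, hv⟩ := pvWs_spec xs p hp
  rw [hv, hpj]
  simp

theorem pvAlt_length (xs : List String) :
    (make_unique_names_py_alt xs).length = xs.length := by
  rw [pvAlt_eq_foldWs, pvFoldSet_length]
  simp

theorem pvAlt_eq_target (xs : List String) : make_unique_names_py_alt xs = pvTarget xs := by
  apply List.ext_getElem?
  intro i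
  by_cases hi : i < xs.length
  · rw [pvAlt_getElem? xs i hi]
    simp [pvTarget, hi]
  · rw [List.getElem?_eq_none, List.getElem?_eq_none]
    · simp [pvTarget]; omega
    · rw [pvAlt_length]; omega

-- ===== VERDICT (by name: the statement is the Claim_ definition above) =====
theorem make_unique_names_py_spec : Claim_equal_make_unique_names_py := by
  intro names _
  show make_unique_names_py names = make_unique_names_py_alt names
  rw [pvA_eq_target, pvAlt_eq_target]
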